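-- pv_equiv track=rewrite | github.com/florcabral/leetcode-problems | autocomplete_dictionary.py | getAutocompleteScores
-- ===== SOURCE A (Python) =====
-- def splitter(listToSplit):
--
--     # turns the documents into array of sublists of individual strings
--     splitlist = []
--     for item in listToSplit:
--         splitlist.append((item.split(' ')))
--
--     # last step to "flatten" all sublists into one list of strings
--     itemsList = []
--     for sublist in splitlist:
--         itemsList.extend(sublist)
--
--     return itemsList
--
-- def resetFound(titlesList, bodiesList):
--
--     # fill a dictionary with the words in the documents
--     found = {}
--
--     for i in titlesList:
--         found[i] = 0
--
--     for j in bodiesList: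
--         if (j not in found):
--             found[j] = 0
--
--     return found
--
-- def getAutocompleteScores(documentTitles, documentBodies, queries):
--
--     scores = []
--
--     titlesList = splitter(documentTitles)
--     bodiesList = splitter(documentBodies)
--
--     for query in queries:    # loop through every query, check for matches in documents and titles
--
--         found = resetFound(titlesList, bodiesList)
--         lenquery = len(query)
--
--         for title in titlesList:   # check titles and look for matches to the current query
--
--             lentitle = len(title)
--             i = 0
--
--             while (i < lenquery and i < lentitle):
--
--                 if (query[i] != title[i]):   # no match, break
--                     break
--
--                 while (query[i] == title[i]):   # found a match
--
--                     if (i == lenquery-1 or i == lentitle-1):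
--                         found[title] += 10
--                         i = float('inf')
--                         break
--                     i+=1
--
--         for body in bodiesList:      # check bodies and look for matches to the current query
--
--             lenbody = len(body)
--             i = 0
--
--             while (i < lenquery and i < lenbody):   # found a match
--
--                 if (query[i] != body[i]):   # no match, break
--                     break
--
--                 while (query[i] == body[i]):
--
--                     if (i == lenquery-1 or i == lenbody-1):
--                         found[body] += 1
--                         i = float('inf')
--                         break
--                     i+=1
--
--
--         bestscore = 0    # retrieve the best score for this query
--
--         for result in found:
--             if (found[result] > bestscore):
--                 bestscore = found[result]
--
--         scores.append(bestscore)
--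
--     return scores
-- ===== SOURCE B (Python) =====
-- def getAutocompleteScores(documentTitles, documentBodies, queries):
--     # Build the per-word weight table ONCE (10 per title occurrence, 1 per body
--     # occurrence) instead of rebuilding and rescanning all word occurrences for
--     # every query; a word matches a query iff one is a prefix of the other.
--     weights = {}
--     for doc in documentTitles:
--         for w in doc.split(' '):
--             weights[w] = weights.get(w, 0) + 10
--     for doc in documentBodies:
--         for w in doc.split(' '):
--             weights[w] = weights.get(w, 0) + 1
--     scores = []
--     for q in queries:
--         best = 0
--         if q:
--             for w, wt in weights.items():
--                 if w and (w.startswith(q) or q.startswith(w)) and wt > best: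
--                     best = wt
--         scores.append(best)
--     return scores
-- ===== Notes on version B (the rewrite author's own statement) =====
-- stated objective: faster
-- what changed: B aggregates each distinct word's weight (10 per title occurrence, 1 per body occurrence) into one dict built once before the query loop and replaces A's per-query dict rebuild plus hand-rolled nested character-scanning loops over every word occurrence by a single startswith prefix test per distinct word.
import Mathlib
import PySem

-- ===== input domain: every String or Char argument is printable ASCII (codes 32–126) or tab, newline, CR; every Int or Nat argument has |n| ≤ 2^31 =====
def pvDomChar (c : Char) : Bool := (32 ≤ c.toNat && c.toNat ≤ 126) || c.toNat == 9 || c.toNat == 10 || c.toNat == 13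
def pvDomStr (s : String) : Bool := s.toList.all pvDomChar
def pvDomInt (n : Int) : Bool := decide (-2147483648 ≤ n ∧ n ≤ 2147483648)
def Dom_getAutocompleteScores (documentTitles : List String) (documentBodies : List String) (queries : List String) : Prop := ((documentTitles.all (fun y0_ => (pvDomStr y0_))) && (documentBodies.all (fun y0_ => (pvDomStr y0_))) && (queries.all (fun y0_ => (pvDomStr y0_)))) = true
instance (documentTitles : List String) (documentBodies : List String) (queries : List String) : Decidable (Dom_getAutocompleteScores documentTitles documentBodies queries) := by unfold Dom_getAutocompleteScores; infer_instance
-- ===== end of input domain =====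

-- B replaces A's per-query dict rebuild and hand-rolled per-occurrence character loops by one
-- per-distinct-word weight dict built once before the query loop and a startswith prefix test.

-- ===== PORT A =====
-- item.split(' '): the separator " " is a fixed nonempty literal, so Python never raises here
def pySplitSpace (item : String) : List String := (PySem.Str.split? item " ").getD []

def splitter (listToSplit : List String) : List String :=
  let splitlist := listToSplit.foldl (fun acc item => acc ++ [pySplitSpace item]) []
  splitlist.foldl (fun itemsList sublist => itemsList ++ sublist) []

def resetFound (titlesList bodiesList : List String) : PySem.Dict String Int :=
  let found := titlesList.foldl (fun d i => d.insert i 0) PySem.Dict.empty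
  bodiesList.foldl (fun d j => if !(d.contains j) then d.insert j 0 else d) found

-- the inner `while query[i] == title[i]` loop of A; on a mismatch control returns to the outer
-- `while`, which immediately breaks on that same mismatch, hence `false` directly; fuel counts
-- the remaining loop steps (min len - i, always > 0 at every reachable call, see innerMatch_spec)
def innerMatch (q t : List Char) : Nat → Nat → Bool
  | 0, _ => false
  | fuel + 1, i =>
    if q.getD i ' ' = t.getD i ' ' then
      if i = q.length - 1 ∨ i = t.length - 1 then true
      else innerMatch q t fuel (i + 1)
    else false

-- the outer `while i < lenquery and i < lentitle` loop: true iff found[word] gets incremented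
def matchLoop (q t : List Char) : Bool :=
  if 0 < q.length ∧ 0 < t.length then
    if q.getD 0 ' ' ≠ t.getD 0 ' ' then false
    else innerMatch q t (min q.length t.length) 0
  else false

-- the `found` dict after A's title and body scanning loops for one query
def foundFor (titlesList bodiesList : List String) (query : String) : PySem.Dict String Int :=
  bodiesList.foldl
    (fun d body => if matchLoop query.toList body.toList then d.insert body (d.getD body 0 + 1) else d)
    (titlesList.foldl
      (fun d title => if matchLoop query.toList title.toList then d.insert title (d.getD title 0 + 10) else d)
      (resetFound titlesList bodiesList))

-- body of A's `for query in queries` loop: the `for result in found` best-score scan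
def bestScoreFor (titlesList bodiesList : List String) (query : String) : Int :=
  (foundFor titlesList bodiesList query).keys.foldl
    (fun bestscore result =>
      if (foundFor titlesList bodiesList query).getD result 0 > bestscore
      then (foundFor titlesList bodiesList query).getD result 0 else bestscore) 0

def getAutocompleteScores (documentTitles : List String) (documentBodies : List String) (queries : List String) : List Int :=
  queries.foldl (fun scores query =>
    scores ++ [bestScoreFor (splitter documentTitles) (splitter documentBodies) query]) []

-- ===== PORT B =====
-- B's weight dict, built once: +10 per title-word occurrence, +1 per body-word occurrence
def weightsB (documentTitles documentBodies : List String) : PySem.Dict String Int :=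
  documentBodies.foldl
    (fun d doc => (pySplitSpace doc).foldl (fun d w => d.insert w (d.getD w 0 + 1)) d)
    (documentTitles.foldl
      (fun d doc => (pySplitSpace doc).foldl (fun d w => d.insert w (d.getD w 0 + 10)) d)
      PySem.Dict.empty)

-- body of B's `for q in queries` loop
def altBest (weights : PySem.Dict String Int) (q : String) : Int :=
  if q = "" then 0
  else
    weights.items.foldl (fun best p =>
      if p.1 ≠ "" ∧ (PySem.Str.startswith p.1 q ∨ PySem.Str.startswith q p.1) ∧ p.2 > best
      then p.2 else best) 0

def getAutocompleteScores_alt (documentTitles : List String) (documentBodies : List String) (queries : List String) : List Int :=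
  queries.foldl (fun scores q => scores ++ [altBest (weightsB documentTitles documentBodies) q]) []

-- ===== PRECONDITION & SPEC =====
def Spec_getAutocompleteScores (documentTitles : List String) (documentBodies : List String) (queries : List String) (out : List Int) : Prop := out = getAutocompleteScores_alt documentTitles documentBodies queries
instance (documentTitles : List String) (documentBodies : List String) (queries : List String) (out : List Int) : Decidable (Spec_getAutocompleteScores documentTitles documentBodies queries out) := by unfold Spec_getAutocompleteScores; infer_instance

-- ===== CLAIM (what is proved, stated in full; the proofs are below) =====
def Claim_equal_getAutocompleteScores : Prop := ∀ (documentTitles : List String) (documentBodies : List String) (queries : List String), Dom_getAutocompleteScores documentTitles documentBodies queries → Spec_getAutocompleteScores documentTitles documentBodies queries (getAutocompleteScores documentTitles documentBodies queries)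

-- ===== LEMMAS AND PROOFS =====

-- B's weight dict expressed over the flattened word lists
def weightsFlat (tl bl : List String) : PySem.Dict String Int :=
  bl.foldl (fun d w => d.insert w (d.getD w 0 + 1))
    (tl.foldl (fun d w => d.insert w (d.getD w 0 + 10)) PySem.Dict.empty)

lemma splitter_eq (docs : List String) : splitter docs = (docs.map pySplitSpace).flatten := by
  unfold splitter
  rw [PySem.List.foldl_append_singleton_eq_map, List.nil_append,
      PySem.List.foldl_append_eq_flatten, List.nil_append]

lemma foldl_docs (docs : List String) (g : PySem.Dict String Int → String → PySem.Dict String Int)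
    (d : PySem.Dict String Int) :
    docs.foldl (fun d doc => (pySplitSpace doc).foldl g d) d = (splitter docs).foldl g d := by
  rw [splitter_eq, List.foldl_flatten, List.foldl_map]

lemma weightsB_eq (dT dB : List String) : weightsB dT dB = weightsFlat (splitter dT) (splitter dB) := by
  unfold weightsB weightsFlat
  rw [foldl_docs, foldl_docs]

lemma getD_fold_add (l : List String) (k : Int) (d : PySem.Dict String Int) (w : String) :
    (l.foldl (fun d x => d.insert x (d.getD x 0 + k)) d).getD w 0
      = d.getD w 0 + k * (l.count w : Int) := by
  induction l generalizing d with
  | nil => simp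
  | cons x l ih =>
    rw [List.foldl_cons, ih, PySem.Dict.getD_insert, List.count_cons]
    by_cases h : w = x
    · subst h
      simp only [beq_self_eq_true, if_true]
      push_cast; ring
    · have hbeq : (x == w) = false := by simp [Ne.symm h]
      simp only [if_neg h, hbeq, Bool.false_eq_true, if_false]
      push_cast; ring

lemma getD_fold_cond_add (l : List String) (p : String → Bool) (k : Int)
    (d : PySem.Dict String Int) (w : String) :
    (l.foldl (fun d x => if p x then d.insert x (d.getD x 0 + k) else d) d).getD w 0
      = d.getD w 0 + (if p w then k * (l.count w : Int) else 0) := by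
  induction l generalizing d with
  | nil => simp
  | cons x l ih =>
    rw [List.foldl_cons]
    by_cases hp : p x = true
    · rw [if_pos hp, ih, PySem.Dict.getD_insert, List.count_cons]
      by_cases h : w = x
      · subst h
        simp only [if_pos hp, beq_self_eq_true, if_true]
        push_cast; ring
      · have hbeq : (x == w) = false := by simp [Ne.symm h]
        simp only [if_neg h, hbeq, Bool.false_eq_true, if_false]
        push_cast; ring
    · rw [if_neg hp, ih, List.count_cons]
      by_cases hpw : p w = true
      · have h : ¬ (w = x) := fun he => hp (he ▸ hpw)
        have hbeq : (x == w) = false := by simp [Ne.symm h]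
        simp only [if_pos hpw, hbeq, Bool.false_eq_true, if_false]
        push_cast; ring
      · simp only [if_neg hpw]

lemma getD_fold_insert_zero (l : List String) (d : PySem.Dict String Int)
    (h : ∀ w, d.getD w 0 = 0) (w : String) :
    (l.foldl (fun d i => d.insert i (0 : Int)) d).getD w 0 = 0 := by
  induction l generalizing d with
  | nil => exact h w
  | cons x l ih =>
    rw [List.foldl_cons]
    refine ih _ (fun w' => ?_)
    rw [PySem.Dict.getD_insert]
    split <;> [rfl; exact h w']

lemma getD_fold_setdefault_zero (l : List String) (d : PySem.Dict String Int)
    (h : ∀ w, d.getD w 0 = 0) (w : String) :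
    (l.foldl (fun d j => if !(d.contains j) then d.insert j (0 : Int) else d) d).getD w 0 = 0 := by
  induction l generalizing d with
  | nil => exact h w
  | cons x l ih =>
    rw [List.foldl_cons]
    refine ih _ (fun w' => ?_)
    by_cases hc : d.contains x
    · simp [hc, h w']
    · simp only [hc, Bool.not_false, if_true]
      rw [PySem.Dict.getD_insert]
      split <;> [rfl; exact h w']

lemma getD_resetFound (tl bl : List String) (w : String) :
    (resetFound tl bl).getD w 0 = 0 := by
  unfold resetFound
  exact getD_fold_setdefault_zero bl _ (getD_fold_insert_zero tl _ (by simp)) w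

lemma keys_fold_cond (l : List String) (p : String → Bool)
    (f : PySem.Dict String Int → String → Int) (d : PySem.Dict String Int) :
    (l.foldl (fun d x => if p x then d.insert x (f d x) else d) d).keys
      = PySem.Set.update d.keys (l.filter p) := by
  induction l generalizing d with
  | nil => rw [List.foldl_nil, List.filter_nil, PySem.Set.update_nil]
  | cons x l ih =>
    rw [List.foldl_cons, List.filter_cons]
    by_cases hp : p x = true
    · rw [if_pos hp, if_pos hp, ih, PySem.Set.update_cons]
      congr 1
      by_cases hc : d.contains x
      · rw [PySem.Dict.keys_insert_of_contains d (f d x) hc,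
            PySem.Set.add_of_mem (Iff.mp (PySem.Dict.contains_iff_mem_keys d x) hc)]
      · rw [PySem.Dict.keys_insert_of_not_contains d (f d x) (by simpa using hc),
            PySem.Set.add_of_not_mem (fun hm => hc (Iff.mpr (PySem.Dict.contains_iff_mem_keys d x) hm))]
    · rw [if_neg hp, if_neg hp, ih]

lemma keys_fold_setdefault (l : List String) (d : PySem.Dict String Int) :
    (l.foldl (fun d j => if !(d.contains j) then d.insert j (0 : Int) else d) d).keys
      = PySem.Set.update d.keys l := by
  induction l generalizing d with
  | nil => rw [List.foldl_nil, PySem.Set.update_nil]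
  | cons x l ih =>
    rw [List.foldl_cons, PySem.Set.update_cons]
    by_cases hc : d.contains x
    · rw [if_neg (by simp [hc]), ih,
          PySem.Set.add_of_mem (Iff.mp (PySem.Dict.contains_iff_mem_keys d x) hc)]
    · rw [if_pos (by simp [hc]), ih,
          PySem.Dict.keys_insert_of_not_contains d (0 : Int) (by simpa using hc),
          PySem.Set.add_of_not_mem (fun hm => hc (Iff.mpr (PySem.Dict.contains_iff_mem_keys d x) hm))]

lemma keys_resetFound (tl bl : List String) :
    (resetFound tl bl).keys = PySem.Set.ofList (tl ++ bl) := by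
  unfold resetFound
  rw [keys_fold_setdefault, PySem.Dict.keys_foldl_insert (f := fun _ _ => (0 : Int)),
      PySem.Dict.keys_empty, PySem.Set.update_nil_left, PySem.Set.ofList_append]

lemma set_update_of_forall_mem (s : PySem.Set String) (xs : List String)
    (h : ∀ x ∈ xs, x ∈ s) : PySem.Set.update s xs = s := by
  rw [PySem.Set.update_eq_append_filter]
  have hnil : List.filter (fun y => !s.contains y) (PySem.Set.ofList xs) = [] := by
    apply List.filter_eq_nil_iff.mpr
    intro y hy
    have := h y (Iff.mp (PySem.Set.mem_ofList xs y) hy)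
    simp [this]
  rw [hnil, List.append_nil]

lemma foundFor_getD (tl bl : List String) (q : String) (w : String) :
    (foundFor tl bl q).getD w 0
      = if matchLoop q.toList w.toList
        then 10 * (tl.count w : Int) + (bl.count w : Int) else 0 := by
  unfold foundFor
  rw [getD_fold_cond_add, getD_fold_cond_add, getD_resetFound]
  by_cases hcw : matchLoop q.toList w.toList = true
  · rw [if_pos hcw, if_pos hcw, if_pos hcw]; ring
  · rw [if_neg hcw, if_neg hcw, if_neg hcw]; ring

lemma foundFor_keys (tl bl : List String) (q : String) :
    (foundFor tl bl q).keys = PySem.Set.ofList (tl ++ bl) := by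
  unfold foundFor
  rw [keys_fold_cond, keys_fold_cond, keys_resetFound,
      set_update_of_forall_mem _ _ (fun x hx => Iff.mpr (PySem.Set.mem_ofList (tl ++ bl) x)
        (List.mem_append.mpr (Or.inl (List.mem_of_mem_filter hx)))),
      set_update_of_forall_mem _ _ (fun x hx => Iff.mpr (PySem.Set.mem_ofList (tl ++ bl) x)
        (List.mem_append.mpr (Or.inr (List.mem_of_mem_filter hx))))]

lemma foldl_zero_keep (l : List String) :
    l.foldl (fun b (_ : String) => if (0 : Int) > b then 0 else b) 0 = 0 := by
  induction l with
  | nil => rfl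
  | cons x l ih => simpa using ih

lemma innerMatch_spec (q t : List Char) (fuel : Nat) :
    ∀ i : Nat, i + fuel = min q.length t.length → i < min q.length t.length →
    (innerMatch q t fuel i = true ↔
      ∀ j, i ≤ j → j < min q.length t.length → q.getD j ' ' = t.getD j ' ') := by
  induction fuel with
  | zero => intro i h1 h2; omega
  | succ fuel ih =>
    intro i h1 h2
    simp only [innerMatch]
    by_cases heq : q.getD i ' ' = t.getD i ' '
    · rw [if_pos heq]
      by_cases hlast : i = q.length - 1 ∨ i = t.length - 1
      · rw [if_pos hlast]
        refine iff_of_true rfl ?_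
        intro j hj1 hj2
        have hji : j = i := by rcases hlast with h | h <;> omega
        rwa [hji]
      · rw [if_neg hlast]
        have hi1 : i + 1 < min q.length t.length := by omega
        rw [ih (i + 1) (by omega) hi1]
        constructor
        · intro h j hj1 hj2
          rcases Nat.eq_or_lt_of_le hj1 with rfl | hlt
          · exact heq
          · exact h j hlt hj2
        · intro h j hj1 hj2
          exact h j (by omega) hj2
    · rw [if_neg heq]
      exact iff_of_false (by simp) (fun h => heq (h i le_rfl h2))

lemma agree_of_le (q t : List Char) (hle : q.length ≤ t.length) :
    (∀ j, j < min q.length t.length → q.getD j ' ' = t.getD j ' ') ↔ q <+: t := by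
  have hmin : min q.length t.length = q.length := by omega
  rw [hmin]
  constructor
  · intro h
    rw [List.prefix_iff_eq_take]
    apply List.ext_getElem (by simp [List.length_take]; omega)
    intro i hi1 hi2
    have hit : i < t.length := by omega
    have hi := h i hi1
    rw [List.getD_eq_getElem q ' ' hi1, List.getD_eq_getElem t ' ' hit] at hi
    simpa [List.getElem_take] using hi
  · rintro ⟨r, rfl⟩ j hj
    have hjr : j < (q ++ r).length := by simp; omega
    rw [List.getD_eq_getElem q ' ' hj, List.getD_eq_getElem _ ' ' hjr,
        List.getElem_append_left hj]

lemma agree_iff_prefix_or (q t : List Char) :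
    (∀ j, j < min q.length t.length → q.getD j ' ' = t.getD j ' ') ↔ (q <+: t ∨ t <+: q) := by
  by_cases hle : q.length ≤ t.length
  · rw [agree_of_le q t hle]
    constructor
    · exact Or.inl
    · rintro (h | h)
      · exact h
      · have he := h.eq_of_length (le_antisymm h.length_le hle)
        subst he; exact List.prefix_refl _
  · have hle' : t.length ≤ q.length := by omega
    have hcomm : (∀ j, j < min q.length t.length → q.getD j ' ' = t.getD j ' ')
        ↔ (∀ j, j < min t.length q.length → t.getD j ' ' = q.getD j ' ') := by
      constructor <;> intro h j hj <;> exact (h j (by omega)).symm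
    rw [hcomm, agree_of_le t q hle']
    constructor
    · exact Or.inr
    · rintro (h | h)
      · have he := h.eq_of_length (le_antisymm h.length_le hle')
        subst he; exact List.prefix_refl _
      · exact h

lemma matchLoop_spec (q t : List Char) :
    matchLoop q t = true ↔ (q ≠ [] ∧ t ≠ [] ∧ (q <+: t ∨ t <+: q)) := by
  unfold matchLoop
  by_cases h : 0 < q.length ∧ 0 < t.length
  · rw [if_pos h]
    have hq : q ≠ [] := by intro hn; subst hn; simp at h
    have ht : t ≠ [] := by intro hn; subst hn; simp at h
    by_cases heq0 : q.getD 0 ' ' = t.getD 0 ' '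
    · rw [if_neg (by simpa using heq0)]
      have hm : 0 < min q.length t.length := by omega
      rw [innerMatch_spec q t (min q.length t.length) 0 (by omega) hm]
      constructor
      · intro hag
        exact ⟨hq, ht, (agree_iff_prefix_or q t).mp (fun j hj => hag j (Nat.zero_le j) hj)⟩
      · rintro ⟨-, -, hpre⟩ j _ hj
        exact (agree_iff_prefix_or q t).mpr hpre j hj
    · rw [if_pos heq0]
      refine iff_of_false (by simp) ?_
      rintro ⟨-, -, hpre⟩
      exact heq0 ((agree_iff_prefix_or q t).mpr hpre 0 (by omega))
  · rw [if_neg h]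
    refine iff_of_false (by simp) ?_
    rintro ⟨hq, ht, -⟩
    exact h ⟨List.length_pos_of_ne_nil hq, List.length_pos_of_ne_nil ht⟩

lemma foldl_best_eq (c : String → Bool) (wt : String → Int) (l : List String) :
    ∀ b : Int, 0 ≤ b →
    l.foldl (fun b w => if (if c w then wt w else 0) > b then (if c w then wt w else 0) else b) b
      = l.foldl (fun b w => if (c w = true ∧ wt w > b) then wt w else b) b := by
  induction l with
  | nil => intro b _; rfl
  | cons x l ih =>
    intro b hb
    rw [List.foldl_cons, List.foldl_cons]
    by_cases hc : c x = true
    · by_cases hgt : wt x > b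
      · have e1 : (if (if c x then wt x else 0) > b then (if c x then wt x else 0) else b) = wt x := by
          rw [if_pos hc]; exact if_pos hgt
        have e2 : (if (c x = true ∧ wt x > b) then wt x else b) = wt x := if_pos ⟨hc, hgt⟩
        rw [e1, e2]
        exact ih _ (by omega)
      · have e1 : (if (if c x then wt x else 0) > b then (if c x then wt x else 0) else b) = b := by
          rw [if_pos hc]; exact if_neg hgt
        have e2 : (if (c x = true ∧ wt x > b) then wt x else b) = b := if_neg (by tauto)
        rw [e1, e2]
        exact ih _ hb
    · have e1 : (if (if c x then wt x else 0) > b then (if c x then wt x else 0) else b) = b := by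
        rw [if_neg hc]; exact if_neg (by omega)
      have e2 : (if (c x = true ∧ wt x > b) then wt x else b) = b := if_neg (fun hh => hc hh.1)
      rw [e1, e2]
      exact ih _ hb

lemma best_eq (tl bl : List String) (q : String) :
    bestScoreFor tl bl q = altBest (weightsFlat tl bl) q := by
  have hWget : ∀ w, (weightsFlat tl bl).getD w 0 = 10 * (tl.count w : Int) + (bl.count w : Int) := by
    intro w
    unfold weightsFlat
    rw [getD_fold_add, getD_fold_add, PySem.Dict.getD_empty]
    ring
  have hWkeys : (weightsFlat tl bl).keys = PySem.Set.ofList (tl ++ bl) := by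
    unfold weightsFlat
    rw [PySem.Dict.keys_foldl_insert (f := fun d w => d.getD w 0 + 1),
        PySem.Dict.keys_foldl_insert (f := fun d w => d.getD w 0 + 10),
        PySem.Dict.keys_empty, PySem.Set.update_nil_left, PySem.Set.ofList_append]
  have hnd : (weightsFlat tl bl).keys.Nodup := by
    rw [hWkeys]; exact PySem.Set.nodup_ofList _
  unfold bestScoreFor
  by_cases hq : q = ""
  · subst hq
    have halt : altBest (weightsFlat tl bl) "" = 0 := by simp [altBest]
    rw [halt]
    have hcf : ∀ w : String, matchLoop "".toList w.toList = false := by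
      intro w
      apply Bool.eq_false_iff.mpr
      intro hct
      exact (((matchLoop_spec _ _).mp hct).1) rfl
    rw [PySem.List.foldl_congr_mem _ _ (fun b (_ : String) => if (0 : Int) > b then 0 else b) 0
        (fun acc x _ => by rw [foundFor_getD, hcf x]; simp)]
    exact foldl_zero_keep _
  · have halt : altBest (weightsFlat tl bl) q
        = (weightsFlat tl bl).items.foldl (fun best p =>
            if p.1 ≠ "" ∧ (PySem.Str.startswith p.1 q ∨ PySem.Str.startswith q p.1) ∧ p.2 > best
            then p.2 else best) 0 := by
      simp [altBest, hq]
    rw [halt, PySem.Dict.items_eq_map_keys _ hnd 0, List.foldl_map, hWkeys, foundFor_keys]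
    rw [PySem.List.foldl_congr_mem _ _
        (fun b w => if (if matchLoop q.toList w.toList then 10 * (tl.count w : Int) + (bl.count w : Int) else 0) > b
                    then (if matchLoop q.toList w.toList then 10 * (tl.count w : Int) + (bl.count w : Int) else 0)
                    else b) 0
        (fun acc x _ => by rw [foundFor_getD])]
    rw [foldl_best_eq (fun w => matchLoop q.toList w.toList)
        (fun w => 10 * (tl.count w : Int) + (bl.count w : Int)) _ 0 le_rfl]
    apply PySem.List.foldl_congr_mem
    intro acc w _
    dsimp only
    rw [hWget w]
    refine if_congr ?_ rfl rfl
    rw [show (matchLoop q.toList w.toList = true) ↔ _ from matchLoop_spec q.toList w.toList]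
    constructor
    · rintro ⟨⟨-, hw, hpre⟩, hgt⟩
      refine ⟨fun he => hw (by simp [he]), ?_, hgt⟩
      rcases hpre with h | h
      · exact Or.inl (by rw [PySem.Str.startswith_eq]; exact (PySem.Chars.startswith_iff _ _).mpr h)
      · exact Or.inr (by rw [PySem.Str.startswith_eq]; exact (PySem.Chars.startswith_iff _ _).mpr h)
    · rintro ⟨hw, hpre, hgt⟩
      refine ⟨⟨fun he => hq (String.toList_eq_nil_iff.mp he),
              fun he => hw (String.toList_eq_nil_iff.mp he), ?_⟩, hgt⟩
      rcases hpre with h | h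
      · exact Or.inl ((PySem.Chars.startswith_iff _ _).mp (by rw [← PySem.Str.startswith_eq]; exact h))
      · exact Or.inr ((PySem.Chars.startswith_iff _ _).mp (by rw [← PySem.Str.startswith_eq]; exact h))

-- ===== VERDICT (by name: the statement is the Claim_ definition above) =====
theorem getAutocompleteScores_spec : Claim_equal_getAutocompleteScores := by
  intro documentTitles documentBodies queries _
  unfold Spec_getAutocompleteScores
  show getAutocompleteScores documentTitles documentBodies queries
      = getAutocompleteScores_alt documentTitles documentBodies queries
  unfold getAutocompleteScores getAutocompleteScores_alt
  rw [PySem.List.foldl_append_singleton_eq_map, PySem.List.foldl_append_singleton_eq_map,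
      List.nil_append, List.nil_append]
  refine List.map_congr_left (fun q _ => ?_)
  rw [weightsB_eq]
  exact best_eq (splitter documentTitles) (splitter documentBodies) q
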